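-- pv_equiv track=rewrite | github.com/geekcampus/pro-python | demos/test_rmb.py | _rmb_toupper_inner
-- ===== SOURCE A (Python) =====
-- from collections import deque
--
-- def _rmb_toupper_inner(amount:int,zero=False):
--   metas = ['零', '壹', '贰', '叁', '肆', '伍', '陆', '柒', '捌', '玖']
--   bases = ['','拾','佰','仟','万']
--   chars = deque()
--   base = 0
--   while amount > 0:
--     div = amount // 10
--     remain = amount % 10
--     if remain:
--       if zero:
--         chars.appendleft('零')
--         zero = False
--       chars.appendleft(metas[remain]+bases[base])
--     else:
--       zero = zero or len(chars) > 0
--     amount = div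
--     base += 1
--   return ''.join(chars)
-- ===== SOURCE B (Python) =====
-- def _rmb_toupper_inner(amount: int, zero=False):
--     if amount <= 0:
--         return ''
--     metas = ['零', '壹', '贰', '叁', '肆', '伍', '陆', '柒', '捌', '玖']
--     bases = ['', '拾', '佰', '仟', '万']
--     digits = str(amount)
--     n = len(digits)
--     out = []
--     pending = False
--     for i, ch in enumerate(digits):
--         d = int(ch)
--         if d:
--             if pending:
--                 out.append('零')
--                 pending = False
--             out.append(metas[d] + bases[n - 1 - i])
--         else:
--             pending = bool(out)
--     if zero:
--         out.append('零')
--     return ''.join(out)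
-- ===== Notes on version B (the rewrite author's own statement) =====
-- stated objective: idiomatic
-- what changed: Replaces the least-significant-first while/divmod loop with a deque and appendleft by a single forward pass over str(amount) from the most significant digit, using a list accumulator and a pending-zero flag (the zero=True trailing 零 falls out as one append at the end).
import Mathlib
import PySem

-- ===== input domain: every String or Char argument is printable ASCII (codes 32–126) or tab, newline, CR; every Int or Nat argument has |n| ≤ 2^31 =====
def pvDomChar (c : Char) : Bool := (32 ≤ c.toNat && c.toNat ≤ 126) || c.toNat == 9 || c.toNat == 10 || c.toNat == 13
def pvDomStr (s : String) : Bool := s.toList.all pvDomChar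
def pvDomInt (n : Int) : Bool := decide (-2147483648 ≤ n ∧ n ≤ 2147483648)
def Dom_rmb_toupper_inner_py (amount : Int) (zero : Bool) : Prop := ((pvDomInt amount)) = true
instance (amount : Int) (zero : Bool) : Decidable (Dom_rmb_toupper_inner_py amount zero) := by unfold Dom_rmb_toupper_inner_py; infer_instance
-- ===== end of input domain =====

-- B replaces A's least-significant-first while/divmod loop (deque + appendleft) by a single
-- forward pass over the decimal digit string with a pending-zero flag; same return value.

-- digit tables (module constants used by both versions)
def rmbMetas : List String := ["零", "壹", "贰", "叁", "肆", "伍", "陆", "柒", "捌", "玖"]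
def rmbBases : List String := ["", "拾", "佰", "仟", "万"]

-- ===== PORT A =====
-- while loop of _rmb_toupper_inner; chars is the deque (appendleft = cons).
-- metas[remain] / bases[base] are ported with pyGet?; the '.getD ""' arm is only reached where
-- Python raises IndexError (bases[base] with base ≥ 5), which Pre_ excludes.
def rmbLoopA (amount : Int) (zero : Bool) (chars : List String) (base : Int) : List String :=
  if h : 0 < amount then
    let div := PySem.Int.floordiv amount 10
    let remain := PySem.Int.mod amount 10
    if remain ≠ 0 then
      let chars1 := if zero then "零" :: chars else chars
      rmbLoopA div false
        (((PySem.List.pyGet? rmbMetas remain).getD "" ++ (PySem.List.pyGet? rmbBases base).getD "") :: chars1)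
        (base + 1)
    else
      rmbLoopA div (zero || decide (chars.length > 0)) chars (base + 1)
  else chars
termination_by amount.toNat
decreasing_by
  all_goals
    simp only [div, PySem.Int.floordiv_eq_ediv_of_pos (a := amount) (b := 10) (by omega)] <;> omega

def rmb_toupper_inner_py (amount : Int) (zero : Bool) : String :=
  String.join (rmbLoopA amount zero [] 0)

-- ===== PORT B =====
-- forward for-loop of Source B over the digit characters; int(ch) is ch.toNat - 48 (exact for the
-- decimal digit characters str(amount) produces for amount > 0); n - 1 - i is Nat subtraction,
-- equal to Python's since i < n throughout the loop.
def rmbLoopB (digits : List Char) (n i : Nat) (out : List String) (pending : Bool) : List String :=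
  match digits with
  | [] => out
  | ch :: rest =>
    let d : Nat := ch.toNat - 48
    if d ≠ 0 then
      let out1 := if pending then out ++ ["零"] else out
      rmbLoopB rest n (i + 1)
        (out1 ++ [(PySem.List.pyGet? rmbMetas (d : Int)).getD "" ++ (PySem.List.pyGet? rmbBases ((n - 1 - i : Nat) : Int)).getD ""])
        false
    else
      rmbLoopB rest n (i + 1) out (decide (out.length > 0))

def rmb_toupper_inner_py_alt (amount : Int) (zero : Bool) : String :=
  if amount ≤ 0 then "" else
    let digits := (PySem.Int.toStr amount).toList
    let n := digits.length
    let out := rmbLoopB digits n 0 [] false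
    String.join (if zero then out ++ ["零"] else out)

-- ===== PRECONDITION & SPEC =====
-- Pre_ excludes exactly amount ≥ 100000: there A raises IndexError (bases[base] with base ≥ 5).
def Pre_rmb_toupper_inner_py (amount : Int) (zero : Bool) : Prop := amount < 100000
instance (amount : Int) (zero : Bool) : Decidable (Pre_rmb_toupper_inner_py amount zero) := by
  unfold Pre_rmb_toupper_inner_py; infer_instance

def pvWitness_rmb_toupper_inner_py : Int × Bool := (10203, true)

def Spec_rmb_toupper_inner_py (amount : Int) (zero : Bool) (out : String) : Prop := out = rmb_toupper_inner_py_alt amount zero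
instance (amount : Int) (zero : Bool) (out : String) : Decidable (Spec_rmb_toupper_inner_py amount zero out) := by unfold Spec_rmb_toupper_inner_py; infer_instance

-- ===== CLAIM (what is proved, stated in full; the proofs are below) =====
def Claim_equal_rmb_toupper_inner_py : Prop := ∀ (amount : Int) (zero : Bool), Dom_rmb_toupper_inner_py amount zero → Pre_rmb_toupper_inner_py amount zero → Spec_rmb_toupper_inner_py amount zero (rmb_toupper_inner_py amount zero)

-- ===== LEMMAS AND PROOFS =====

-- MSB-first digit list of a natural number (empty for 0)
def digsN (n : Nat) : List Nat :=
  if h : n = 0 then [] else digsN (n / 10) ++ [n % 10]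
termination_by n
decreasing_by exact Nat.div_lt_self (Nat.pos_of_ne_zero h) (by norm_num)

-- the token emitted for digit d at decimal position p
def Gtok (d p : Nat) : String :=
  (PySem.List.pyGet? rmbMetas (d : Int)).getD "" ++ (PySem.List.pyGet? rmbBases (p : Int)).getD ""

-- common specification: MSB-first scan with pending-zero flag pe and emitted flag em
def Gs : List Nat → Nat → Bool → Bool → List String
  | [], _, _, _ => []
  | d :: r, p, pe, em =>
    if d ≠ 0 then (if pe then ["零"] else []) ++ Gtok d p :: Gs r (p - 1) false true
    else Gs r (p - 1) em em

-- the pending flag after Gs has consumed the list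
def pafs : List Nat → Bool → Bool → Bool
  | [], pe, _ => pe
  | d :: r, pe, em => if d ≠ 0 then pafs r false true else pafs r em em

theorem digsN_zero : digsN 0 = [] := by unfold digsN; simp

theorem digsN_pos {n : Nat} (h : n ≠ 0) : digsN n = digsN (n / 10) ++ [n % 10] := by
  rw [digsN]; simp [h]

theorem digsN_head {m : Nat} (h : 0 < m) : ∃ d t, digsN m = d :: t ∧ d ≠ 0 := by
  induction m using Nat.strong_induction_on with
  | _ m ih =>
    rw [digsN_pos (by omega)]
    by_cases hq : m / 10 = 0
    · refine ⟨m % 10, [], by simp [hq, digsN_zero], ?_⟩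
      omega
    · obtain ⟨d, t, hdt, hd⟩ := ih (m / 10) (by omega) (by omega)
      exact ⟨d, t ++ [m % 10], by simp [hdt], hd⟩

theorem digsN_lt (m : Nat) : ∀ d ∈ digsN m, d < 10 := by
  induction m using Nat.strong_induction_on with
  | _ m ih =>
    by_cases h : m = 0
    · simp [h, digsN_zero]
    · rw [digsN_pos h]
      intro d hd
      rcases List.mem_append.1 hd with h1 | h1
      · exact ih (m / 10) (Nat.div_lt_self (by omega) (by norm_num)) d h1
      · simp at h1; omega

theorem pafs_snoc (D : List Nat) (d : Nat) : ∀ pe em,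
    pafs (D ++ [d]) pe em =
      if d ≠ 0 then false else (em || D.any (fun x => decide (x ≠ 0))) := by
  induction D with
  | nil => intro pe em; by_cases h : d = 0 <;> simp [pafs, h]
  | cons d1 r ih =>
    intro pe em
    by_cases h : d = 0
    · subst h
      by_cases h1 : d1 = 0 <;> simp [pafs, h1, ih, Bool.or_assoc]
    · by_cases h1 : d1 = 0 <;> simp [pafs, h1, ih, h]

theorem Gs_snoc (D : List Nat) (d : Nat) : ∀ p pe em,
    Gs (D ++ [d]) p pe em =
      Gs D p pe em ++
        (if d ≠ 0 then (if pafs D pe em then ["零"] else []) ++ [Gtok d (p - D.length)] else []) := by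
  induction D with
  | nil =>
    intro p pe em
    by_cases h : d = 0 <;> simp [Gs, pafs, h]
  | cons d1 r ih =>
    intro p pe em
    have hlen : p - 1 - r.length = p - (r.length + 1) := by omega
    by_cases h1 : d1 = 0
    · simp only [List.cons_append, Gs, pafs, if_neg (show ¬ d1 ≠ 0 by simp [h1]), ih, hlen,
        List.length_cons]
    · simp only [List.cons_append, Gs, pafs, if_pos (show d1 ≠ 0 from h1), ih, hlen,
        List.length_cons, List.append_assoc, List.cons_append]

-- em is irrelevant when the head digit is nonzero and no zero is pending
theorem Gs_em_irrel {d : Nat} (hd : d ≠ 0) (t : List Nat) (p : Nat) (em em' : Bool) :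
    Gs (d :: t) p false em = Gs (d :: t) p false em' := by
  simp [Gs, hd]

theorem pafs_digsN {q : Nat} (hq : 0 < q) (em : Bool) :
    pafs (digsN q) false em = decide (q % 10 = 0) := by
  rw [digsN_pos (by omega), pafs_snoc]
  by_cases h : q % 10 = 0
  · simp only [h]
    have hq10 : 0 < q / 10 := by omega
    obtain ⟨d, t, hdt, hd⟩ := digsN_head hq10
    simp [hdt, List.any_cons, hd]
  · simp [h]

-- A's loop equals the common spec (strong induction peeling the least significant digit)
theorem loopA_spec : ∀ m : Nat, ∀ (zero : Bool) (chars : List String) (base : Nat),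
    rmbLoopA (m : Int) zero chars (base : Int) =
      (Gs (digsN m) (base + (digsN m).length - 1) false (decide (chars.length > 0)) ++
        (if decide (m ≠ 0) && (zero || (decide (chars.length > 0) && decide (m % 10 = 0)))
          then ["零"] else [])) ++ chars := by
  intro m
  induction m using Nat.strong_induction_on with
  | _ m ih =>
    intro zero chars base
    by_cases hm : m = 0
    · subst hm
      rw [rmbLoopA]
      simp [digsN_zero, Gs]
    · have hmpos : (0 : Int) < (m : Int) := by exact_mod_cast Nat.pos_of_ne_zero hm
      rw [rmbLoopA]
      simp only [hmpos, dif_pos]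
      have hdiv : PySem.Int.floordiv (m : Int) 10 = ((m / 10 : Nat) : Int) := by
        rw [PySem.Int.floordiv_eq_ediv_of_pos (by omega)]; omega
      have hmod : PySem.Int.mod (m : Int) 10 = ((m % 10 : Nat) : Int) := by
        rw [PySem.Int.mod_eq_emod_of_pos (by omega)]; omega
      have hb1 : ((base : Int) + 1) = ((base + 1 : Nat) : Int) := by push_cast; ring
      rw [hdiv, hmod, hb1]
      have hP' : (base + 1) + (digsN (m / 10)).length - 1 = base + (digsN (m / 10)).length := by
        omega
      have hP2 : base + ((digsN (m / 10)).length + 1) - 1 = base + (digsN (m / 10)).length := by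
        omega
      by_cases hrem : m % 10 = 0
      · -- zero digit: flag becomes zero || (chars nonempty)
        have hq : 0 < m / 10 := by omega
        simp only [hrem, Nat.cast_zero, ne_eq, not_true_eq_false, if_false]
        rw [ih (m / 10) (by omega) _ _ (base + 1), hP']
        rw [digsN_pos hm, hrem, Gs_snoc]
        simp only [ne_eq, not_true_eq_false, if_false, List.append_nil, List.length_append,
          List.length_cons, List.length_nil, Nat.zero_add]
        rw [hP2]
        congr 2
        by_cases hz : zero = true <;> by_cases hc : decide (chars.length > 0) = true <;>
          simp_all
      · -- nonzero digit: emit token (preceded by 零 if flag set)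
        have hremC : ((m % 10 : Nat) : Int) ≠ 0 := by
          simp only [ne_eq, Nat.cast_eq_zero]; omega
        simp only [hremC, ne_eq, not_false_eq_true, if_true]
        rw [ih (m / 10) (Nat.div_lt_self (by omega) (by norm_num)) _ _ (base + 1), hP']
        rw [digsN_pos hm, Gs_snoc]
        simp only [List.length_append, List.length_cons, List.length_nil, Nat.zero_add]
        rw [hP2]
        have hP3 : base + (digsN (m / 10)).length - (digsN (m / 10)).length = base := by omega
        rw [hP3]
        by_cases hq : m / 10 = 0
        · -- no digits above
          simp only [hq, digsN_zero, Gs, pafs]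
          simp only [hrem, hm, hq, Gtok]
          by_cases hz : zero = true <;> simp [hz, hrem, Gtok]
        · -- digits above: head of digsN (m/10) is nonzero
          obtain ⟨dh, t, hdt, hd⟩ := digsN_head (Nat.pos_of_ne_zero hq)
          have hGem : ∀ em, Gs (digsN (m / 10)) (base + (digsN (m / 10)).length) false em =
              Gs (digsN (m / 10)) (base + (digsN (m / 10)).length) false true := by
            intro em; rw [hdt]; exact Gs_em_irrel hd _ _ _ _
          have hpaf : pafs (digsN (m / 10)) false (decide (chars.length > 0)) =
              decide (m / 10 % 10 = 0) := pafs_digsN (Nat.pos_of_ne_zero hq) _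
          rw [hGem, hpaf]
          have h10 : 10 ≤ m := by omega
          simp only [hq, hrem, hm, Gtok]
          by_cases hz : zero = true <;>
            by_cases hg : m / 10 % 10 = 0 <;>
              simp [hz, hg, hrem, h10, hGem, Gtok]

theorem digitChar_toNat {d : Nat} (h : d < 10) : (Nat.digitChar d).toNat = 48 + d := by
  interval_cases d <;> decide

theorem digitChar_sub {d : Nat} (h : d < 10) : (Nat.digitChar d).toNat - 48 = d := by
  rw [digitChar_toNat h]; omega

-- B's loop equals the common spec (induction on the digit list, MSB first)
theorem loopB_spec : ∀ (D : List Nat), (∀ d ∈ D, d < 10) →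
    ∀ (n i : Nat) (out : List String) (pending : Bool),
    rmbLoopB (D.map Nat.digitChar) n i out pending =
      out ++ Gs D (n - 1 - i) pending (decide (out.length > 0)) := by
  intro D
  induction D with
  | nil => intro _ n i out pending; simp [rmbLoopB, Gs]
  | cons d r ih =>
    intro hlt n i out pending
    have hd10 : d < 10 := hlt d (by simp)
    have hr : ∀ x ∈ r, x < 10 := fun x hx => hlt x (by simp [hx])
    simp only [List.map_cons, rmbLoopB, digitChar_sub hd10]
    by_cases hd : d = 0
    · simp only [hd, ne_eq, not_true_eq_false, if_false]
      rw [ih hr]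
      have : n - 1 - (i + 1) = n - 1 - i - 1 := by omega
      rw [this]
      simp [Gs]
    · simp only [hd, ne_eq, not_false_eq_true, if_true]
      rw [ih hr]
      have h1 : n - 1 - (i + 1) = n - 1 - i - 1 := by omega
      rw [h1]
      have h2 : decide (((if pending = true then out ++ ["零"] else out) ++
          [(PySem.List.pyGet? rmbMetas (d : Int)).getD "" ++
            (PySem.List.pyGet? rmbBases ((n - 1 - i : Nat) : Int)).getD ""]).length > 0) = true := by
        by_cases hp : pending = true <;> simp [hp]
      rw [h2]
      by_cases hp : pending = true <;> simp [hp, Gs, hd, Gtok]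

theorem toDigitsCore_digs : ∀ (fuel n : Nat) (acc : List Char), 0 < n → n < fuel →
    Nat.toDigitsCore 10 fuel n acc = (digsN n).map Nat.digitChar ++ acc := by
  intro fuel
  induction fuel with
  | zero => intro n acc h1 h2; omega
  | succ fuel ih =>
    intro n acc h1 h2
    rw [Nat.toDigitsCore]
    by_cases hq : n / 10 = 0
    · simp only [hq, if_true]
      rw [digsN_pos (by omega), hq, digsN_zero]
      simp
    · simp only [hq, if_false]
      rw [ih (n / 10) _ (by omega) (by omega)]
      conv_rhs => rw [digsN_pos (show n ≠ 0 by omega)]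
      simp

theorem toChars_digs {m : Nat} (h : 0 < m) :
    PySem.Int.toChars (m : Int) = (digsN m).map Nat.digitChar := by
  rw [PySem.Int.toChars]
  have : ¬ ((m : Int) < 0) := by omega
  simp only [this, if_false, Int.toNat_natCast]
  rw [Nat.toDigits, toDigitsCore_digs (m + 1) m [] h (by omega)]
  simp

-- ===== VERDICT (by name: the statement is the Claim_ definition above) =====
theorem rmb_toupper_inner_py_spec : Claim_equal_rmb_toupper_inner_py := by
  intro amount zero _ _
  unfold Spec_rmb_toupper_inner_py rmb_toupper_inner_py rmb_toupper_inner_py_alt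
  by_cases hle : amount ≤ 0
  · rw [rmbLoopA]
    have : ¬ (0 : Int) < amount := by omega
    simp [this, hle, String.join]
  · have hpos : 0 < amount := by omega
    have hm : amount = ((amount.toNat : Nat) : Int) := by omega
    have hmpos : 0 < amount.toNat := by omega
    simp only [hle, if_false]
    rw [hm, PySem.Int.toList_toStr, toChars_digs hmpos]
    have h0 : ((0 : Nat) : Int) = (0 : Int) := rfl
    rw [← h0, loopA_spec amount.toNat zero [] 0,
        loopB_spec (digsN amount.toNat) (digsN_lt amount.toNat)]
    simp only [List.length_map, List.length_nil, gt_iff_lt, Nat.lt_irrefl, decide_false,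
      Nat.zero_add, Nat.sub_zero, List.append_nil, List.nil_append, Bool.false_or,
      Bool.false_and, Bool.or_false]
    have hne : decide (amount.toNat ≠ 0) = true := by simp; omega
    rw [hne]
    by_cases hz : zero = true <;> simp [hz]
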